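-- pv_equiv track=rewrite | github.com/martymacv/test_system | home_project/clsTesting.py | convert_table_config_to_list
-- ===== SOURCE A (Python) =====
-- def convert_table_config_to_list(table_config: dict, len_list: int):
--     config_list: list = []
--     for schema_name in table_config.keys():
--         for table_name in table_config[schema_name].keys():
--             for column_name in table_config[schema_name][table_name].keys():
--                 for param in table_config[schema_name][table_name][column_name].keys():
--                     row = [schema_name, table_name, column_name, param][:len_list]
--                     if row not in config_list:
--                         config_list.append(row)
--     return config_list
-- ===== SOURCE B (Python) =====
-- def convert_table_config_to_list(table_config: dict, len_list: int):
--     result: list = []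
--     seen: set = set()
--
--     def walk(node, path, depth):
--         if depth == 4:
--             row = path[:len_list]
--             key = tuple(row)
--             if key not in seen:
--                 seen.add(key)
--                 result.append(row)
--             return
--         for k, v in node.items():
--             walk(v, path + [k], depth + 1)
--
--     walk(table_config, [], 0)
--     return result
-- ===== Notes on version B (the rewrite author's own statement) =====
-- stated objective: faster
-- what changed: Replaces the four explicit nested key loops with repeated lookups and a linear 'row not in list' dedup scan by a single recursive walk over items() carrying the key path, deduplicating via a set of tuples in O(1).
import Mathlib
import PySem

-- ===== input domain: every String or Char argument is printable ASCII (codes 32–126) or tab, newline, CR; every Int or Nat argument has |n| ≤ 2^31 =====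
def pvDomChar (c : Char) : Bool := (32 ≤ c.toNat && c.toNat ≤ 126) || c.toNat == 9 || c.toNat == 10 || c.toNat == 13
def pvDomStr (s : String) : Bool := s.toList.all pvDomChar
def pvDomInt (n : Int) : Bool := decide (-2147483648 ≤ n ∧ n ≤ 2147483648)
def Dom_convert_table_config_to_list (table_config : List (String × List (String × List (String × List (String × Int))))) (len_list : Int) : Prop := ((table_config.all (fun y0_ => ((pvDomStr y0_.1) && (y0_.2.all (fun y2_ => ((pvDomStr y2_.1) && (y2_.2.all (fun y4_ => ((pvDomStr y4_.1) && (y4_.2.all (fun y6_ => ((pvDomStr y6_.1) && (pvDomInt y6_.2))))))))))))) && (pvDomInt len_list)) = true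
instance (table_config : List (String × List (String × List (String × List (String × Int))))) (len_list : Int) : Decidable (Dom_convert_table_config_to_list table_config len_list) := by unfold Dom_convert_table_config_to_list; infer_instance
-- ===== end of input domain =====

-- B replaces A's four nested key loops with repeated dict lookups and a linear
-- 'row not in list' dedup scan by one recursive walk over items() carrying the
-- accumulated key path, deduplicating with a hash set (O(1) per candidate row).

-- ===== PORT A =====
-- literal transliteration of A's four nested loops over .keys() with repeated
-- indexing table_config[schema][table][column]; the getD default [] is never
-- used since every key iterated comes from the dict's own keys.
def convert_table_config_to_list (table_config : List (String × List (String × List (String × List (String × Int))))) (len_list : Int) : List (List String) :=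
  let d0 := PySem.Dict.ofList table_config
  d0.keys.foldl (fun config_list schema_name =>
    let d1 := PySem.Dict.ofList (d0.getD schema_name [])
    d1.keys.foldl (fun config_list table_name =>
      let d2 := PySem.Dict.ofList (d1.getD table_name [])
      d2.keys.foldl (fun config_list column_name =>
        let d3 := PySem.Dict.ofList (d2.getD column_name [])
        d3.keys.foldl (fun config_list param =>
          let row := PySem.List.slice [schema_name, table_name, column_name, param] none (some len_list)
          if config_list.contains row then config_list else config_list ++ [row])
          config_list)
        config_list)
      config_list)
    []

-- ===== PORT B =====
-- B's state: (seen set of rows, result rows in first-emission order)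
def pvEmit (len_list : Int) (path : List String)
    (st : PySem.Set (List String) × List (List String)) :
    PySem.Set (List String) × List (List String) :=
  let row := PySem.List.slice path none (some len_list)
  if PySem.Set.contains st.1 row then st else (PySem.Set.add st.1 row, st.2 ++ [row])

-- walk at depth 3 (node's items are the innermost param ↦ int pairs)
def pvWalk3 (len_list : Int) (node : List (String × Int)) (path : List String)
    (st : PySem.Set (List String) × List (List String)) :
    PySem.Set (List String) × List (List String) :=
  (PySem.Dict.ofList node).items.foldl (fun st kv => pvEmit len_list (path ++ [kv.1]) st) st

def pvWalk2 (len_list : Int) (node : List (String × List (String × Int))) (path : List String)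
    (st : PySem.Set (List String) × List (List String)) :
    PySem.Set (List String) × List (List String) :=
  (PySem.Dict.ofList node).items.foldl (fun st kv => pvWalk3 len_list kv.2 (path ++ [kv.1]) st) st

def pvWalk1 (len_list : Int) (node : List (String × List (String × List (String × Int)))) (path : List String)
    (st : PySem.Set (List String) × List (List String)) :
    PySem.Set (List String) × List (List String) :=
  (PySem.Dict.ofList node).items.foldl (fun st kv => pvWalk2 len_list kv.2 (path ++ [kv.1]) st) st

def pvWalk0 (len_list : Int) (node : List (String × List (String × List (String × List (String × Int))))) (path : List String)
    (st : PySem.Set (List String) × List (List String)) :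
    PySem.Set (List String) × List (List String) :=
  (PySem.Dict.ofList node).items.foldl (fun st kv => pvWalk1 len_list kv.2 (path ++ [kv.1]) st) st

def convert_table_config_to_list_alt (table_config : List (String × List (String × List (String × List (String × Int))))) (len_list : Int) : List (List String) :=
  (pvWalk0 len_list table_config [] (PySem.Set.empty, [])).2

-- ===== PRECONDITION & SPEC =====
def Spec_convert_table_config_to_list (table_config : List (String × List (String × List (String × List (String × Int))))) (len_list : Int) (out : List (List String)) : Prop := out = convert_table_config_to_list_alt table_config len_list
instance (table_config : List (String × List (String × List (String × List (String × Int))))) (len_list : Int) (out : List (List String)) : Decidable (Spec_convert_table_config_to_list table_config len_list out) := by unfold Spec_convert_table_config_to_list; infer_instance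

-- ===== CLAIM (what is proved, stated in full; the proofs are below) =====
def Claim_equal_convert_table_config_to_list : Prop := ∀ (table_config : List (String × List (String × List (String × List (String × Int))))) (len_list : Int), Dom_convert_table_config_to_list table_config len_list → Spec_convert_table_config_to_list table_config len_list (convert_table_config_to_list table_config len_list)

-- ===== LEMMAS AND PROOFS =====

-- simulation relation: B's (seen, result) state vs A's config_list
def pvInv (st : PySem.Set (List String) × List (List String)) (cl : List (List String)) : Prop :=
  st.2 = cl ∧ ∀ r, r ∈ st.1 ↔ r ∈ cl

lemma pvEmit_inv (len_list : Int) (path : List String) (st : PySem.Set (List String) × List (List String))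
    (cl : List (List String)) (h : pvInv st cl) :
    pvInv (pvEmit len_list path st)
      (let row := PySem.List.slice path none (some len_list)
       if cl.contains row then cl else cl ++ [row]) := by
  obtain ⟨h2, h1⟩ := h
  set row := PySem.List.slice path none (some len_list) with hrow
  by_cases hm : row ∈ cl
  · have hs : PySem.Set.contains st.1 row = true := by
      rw [PySem.Set.contains_iff]; exact (h1 row).mpr hm
    have hc : cl.contains row = true := by simpa using hm
    simp only [pvEmit, ← hrow, hs, hc, if_true]
    exact ⟨h2, h1⟩
  · have hs : ¬ PySem.Set.contains st.1 row = true := by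
      rw [PySem.Set.contains_iff]; exact fun hx => hm ((h1 row).mp hx)
    have hc : ¬ cl.contains row = true := by simpa using hm
    simp only [pvEmit, ← hrow, hs, hc]
    refine ⟨by simpa using h2, fun r => ?_⟩
    have hsm : r ∈ PySem.Set.add st.1 row ↔ r ∈ st.1 ∨ r = row := PySem.Set.mem_add st.1 row r
    simp [hsm, h1 r, or_comm]

lemma pvFoldl_inv {α : Type} (f : PySem.Set (List String) × List (List String) → α → PySem.Set (List String) × List (List String))
    (g : List (List String) → α → List (List String))
    (h : ∀ st cl a, pvInv st cl → pvInv (f st a) (g cl a)) :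
    ∀ (l : List α) st cl, pvInv st cl → pvInv (l.foldl f st) (l.foldl g cl) := by
  intro l
  induction l with
  | nil => intro st cl hi; simpa using hi
  | cons a t ih => intro st cl hi; exact ih _ _ (h st cl a hi)

-- fold over items of an ofList dict = fold over its keys with getD lookups
lemma pvItems_foldl {ν : Type} {β : Type} (l : List (String × ν)) (dflt : ν)
    (g : β → String × ν → β) (init : β) :
    (PySem.Dict.ofList l).items.foldl g init
      = (PySem.Dict.ofList l).keys.foldl
          (fun acc k => g acc (k, (PySem.Dict.ofList l).getD k dflt)) init := by
  rw [PySem.Dict.items_eq_map_keys (PySem.Dict.ofList l) (PySem.Dict.nodup_keys_ofList l) dflt,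
      List.foldl_map]

lemma pvWalk3_inv (len_list : Int) (d : List (String × Int)) (s t c : String)
    (st : PySem.Set (List String) × List (List String)) (cl : List (List String)) (h : pvInv st cl) :
    pvInv (pvWalk3 len_list d [s, t, c] st)
      ((PySem.Dict.ofList d).keys.foldl (fun config_list param =>
          let row := PySem.List.slice [s, t, c, param] none (some len_list)
          if config_list.contains row then config_list else config_list ++ [row]) cl) := by
  rw [pvWalk3, pvItems_foldl d 0]
  exact pvFoldl_inv _ _ (fun st cl k hi => pvEmit_inv len_list [s, t, c, k] st cl hi) _ st cl h

lemma pvWalk2_inv (len_list : Int) (d : List (String × List (String × Int))) (s t : String)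
    (st : PySem.Set (List String) × List (List String)) (cl : List (List String)) (h : pvInv st cl) :
    pvInv (pvWalk2 len_list d [s, t] st)
      ((PySem.Dict.ofList d).keys.foldl (fun config_list column_name =>
          let d3 := PySem.Dict.ofList ((PySem.Dict.ofList d).getD column_name [])
          d3.keys.foldl (fun config_list param =>
            let row := PySem.List.slice [s, t, column_name, param] none (some len_list)
            if config_list.contains row then config_list else config_list ++ [row]) config_list) cl) := by
  rw [pvWalk2, pvItems_foldl d []]
  exact pvFoldl_inv _ _ (fun st cl k hi => pvWalk3_inv len_list ((PySem.Dict.ofList d).getD k []) s t k st cl hi) _ st cl h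

lemma pvWalk1_inv (len_list : Int) (d : List (String × List (String × List (String × Int)))) (s : String)
    (st : PySem.Set (List String) × List (List String)) (cl : List (List String)) (h : pvInv st cl) :
    pvInv (pvWalk1 len_list d [s] st)
      ((PySem.Dict.ofList d).keys.foldl (fun config_list table_name =>
          let d2 := PySem.Dict.ofList ((PySem.Dict.ofList d).getD table_name [])
          d2.keys.foldl (fun config_list column_name =>
            let d3 := PySem.Dict.ofList (d2.getD column_name [])
            d3.keys.foldl (fun config_list param =>
              let row := PySem.List.slice [s, table_name, column_name, param] none (some len_list)
              if config_list.contains row then config_list else config_list ++ [row]) config_list) config_list) cl) := by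
  rw [pvWalk1, pvItems_foldl d []]
  exact pvFoldl_inv _ _ (fun st cl k hi => pvWalk2_inv len_list ((PySem.Dict.ofList d).getD k []) s k st cl hi) _ st cl h

lemma pvWalk0_inv (len_list : Int) (d : List (String × List (String × List (String × List (String × Int)))))
    (st : PySem.Set (List String) × List (List String)) (cl : List (List String)) (h : pvInv st cl) :
    pvInv (pvWalk0 len_list d [] st)
      ((PySem.Dict.ofList d).keys.foldl (fun config_list schema_name =>
          let d1 := PySem.Dict.ofList ((PySem.Dict.ofList d).getD schema_name [])
          d1.keys.foldl (fun config_list table_name =>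
            let d2 := PySem.Dict.ofList (d1.getD table_name [])
            d2.keys.foldl (fun config_list column_name =>
              let d3 := PySem.Dict.ofList (d2.getD column_name [])
              d3.keys.foldl (fun config_list param =>
                let row := PySem.List.slice [schema_name, table_name, column_name, param] none (some len_list)
                if config_list.contains row then config_list else config_list ++ [row]) config_list) config_list) config_list) cl) := by
  rw [pvWalk0, pvItems_foldl d []]
  exact pvFoldl_inv _ _ (fun st cl k hi => pvWalk1_inv len_list ((PySem.Dict.ofList d).getD k []) k st cl hi) _ st cl h

-- ===== VERDICT (by name: the statement is the Claim_ definition above) =====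
theorem convert_table_config_to_list_spec : Claim_equal_convert_table_config_to_list := by
  intro table_config len_list _hd
  unfold Spec_convert_table_config_to_list convert_table_config_to_list convert_table_config_to_list_alt
  have h0 : pvInv (PySem.Set.empty, ([] : List (List String))) [] := ⟨rfl, by simp [PySem.Set.empty]⟩
  exact ((pvWalk0_inv len_list table_config _ [] h0).1).symm
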